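-- pv_equiv track=rewrite | github.com/cathackk/advent-of-code | y2020/day09_sums.py | validate_xmas
-- ===== SOURCE A (Python) =====
-- from typing import Collection, Iterator
--
-- def validate_xmas(nums: list[int], preamble_length: int = 25) -> Iterator[tuple[int, bool]]:
--     """
--     Yields every number from `nums` after first `preamble_length` values, with its validity info:
--     the number is considered valid if two distinct numbers among previous `preamble_length` values
--     can sum up to it.
--     """
--
--     if len(nums) <= preamble_length:
--         return
--
--     # let's keep a set of fixed length
--     pool = set(nums[:preamble_length])
--
--     for head in range(preamble_length, len(nums)):
--         num = nums[head]
--         valid = find_sum2(num, pool) is not None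
--         yield num, valid
--
--         # rotate numbers in pool -> slightly more effective than sliding window above the nums
--         pool.remove(nums[head - preamble_length])
--         pool.add(num)
--
-- def find_sum2(target_sum: int, numbers: Collection[int]) -> tuple[int, int] | None:
--     """ Find two values among `numbers` that add up to `target_sum`. """
--
--     for a in numbers:
--         b = target_sum - a
--         if a != b and b in numbers:
--             return a, b
--
--     else:
--         return None
-- ===== SOURCE B (Python) =====
-- def validate_xmas(nums: list[int], preamble_length: int = 25):
--     """Same generator, same set-based rotating pool; the inner two-sum test is a
--     two-pointer scan over the sorted pool instead of find_sum2's membership loop."""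
--
--     if len(nums) <= preamble_length:
--         return
--
--     pool = set(nums[:preamble_length])
--
--     for head in range(preamble_length, len(nums)):
--         num = nums[head]
--
--         vals = sorted(pool)
--         l, r = 0, len(vals) - 1
--         valid = False
--         while l < r:
--             s = vals[l] + vals[r]
--             if s == num:
--                 valid = True
--                 break
--             elif s < num:
--                 l += 1
--             else:
--                 r -= 1
--
--         yield num, valid
--
--         pool.remove(nums[head - preamble_length])
--         pool.add(num)
-- ===== Notes on version B (the rewrite author's own statement) =====
-- stated objective: alternative
-- what changed: The inner two-sum test (find_sum2's scan of the pool with a set-membership probe per element) is replaced by a two-pointer scan over the sorted pool; the outer generator and the rotating set pool are unchanged.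
import Mathlib
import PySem

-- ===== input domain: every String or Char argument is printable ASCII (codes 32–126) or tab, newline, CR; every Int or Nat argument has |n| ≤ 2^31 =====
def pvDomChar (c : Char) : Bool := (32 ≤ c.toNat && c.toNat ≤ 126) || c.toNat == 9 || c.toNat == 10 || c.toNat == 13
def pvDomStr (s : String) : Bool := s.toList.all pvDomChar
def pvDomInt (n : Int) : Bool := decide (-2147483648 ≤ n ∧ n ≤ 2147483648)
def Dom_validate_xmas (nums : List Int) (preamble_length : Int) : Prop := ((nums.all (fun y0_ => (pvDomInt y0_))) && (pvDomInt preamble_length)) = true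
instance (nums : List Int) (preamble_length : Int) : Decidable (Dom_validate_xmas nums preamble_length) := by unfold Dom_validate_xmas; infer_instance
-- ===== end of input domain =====

-- B keeps A's rotating set pool and replaces the inner membership-loop two-sum with a
-- two-pointer scan over the sorted pool (objective: alternative algorithm, same cost class).
-- Both Pythons are generators; equivalence is about the list of yielded pairs.

-- ===== PORT A =====

-- find_sum2's 'for a in numbers' loop over the pool (iteration used only through isSome,
-- so the unmodelled set iteration order cannot affect the result)
def find_sum2Aux (target : Int) (numbers : PySem.Set Int) : List Int → Option (Int × Int)
  | [] => none
  | a :: rest =>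
      let b := target - a
      if (!(a == b)) && PySem.Set.contains numbers b then some (a, b)
      else find_sum2Aux target numbers rest

def find_sum2 (target : Int) (numbers : PySem.Set Int) : Option (Int × Int) :=
  find_sum2Aux target numbers numbers

-- one iteration of A's for-loop: state = (yielded so far, pool)
def stepA (nums : List Int) (p : Int) (st : List (Int × Bool) × PySem.Set Int) (head : Int) :
    List (Int × Bool) × PySem.Set Int :=
  let num := (PySem.List.pyGet? nums head).getD 0           -- head always in range inside Pre_
  let valid := (find_sum2 num st.2).isSome
  let pool := (PySem.Set.remove? st.2 ((PySem.List.pyGet? nums (head - p)).getD 0)).getD st.2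
      -- remove?: none = Python KeyError, excluded by Pre_; fallback never reached inside Pre_
  (st.1 ++ [(num, valid)], PySem.Set.add pool num)

def validate_xmas (nums : List Int) (preamble_length : Int) : List (Int × Bool) :=
  if (nums.length : Int) ≤ preamble_length then []
  else
    ((PySem.List.pyRange preamble_length (nums.length : Int)).foldl (stepA nums preamble_length)
      ([], PySem.Set.ofList (PySem.List.slice nums none (some preamble_length)))).1

-- ===== PORT B =====

-- Source B's while-loop two pointers; vals accessed only at l, r with l < r < vals.length
def twoPtrGo (vals : List Int) (target : Int) (l r : Nat) : Bool :=
  if h : l < r then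
    let s := vals.getD l 0 + vals.getD r 0
    if s = target then true
    else if s < target then twoPtrGo vals target (l + 1) r
    else twoPtrGo vals target l (r - 1)
  else false
termination_by r - l
decreasing_by all_goals omega

-- one iteration of B's for-loop; identical rotation, two-pointer validity test
def stepB (nums : List Int) (p : Int) (st : List (Int × Bool) × PySem.Set Int) (head : Int) :
    List (Int × Bool) × PySem.Set Int :=
  let num := (PySem.List.pyGet? nums head).getD 0
  let vals := PySem.List.sorted st.2 (fun x => x)
  let valid := twoPtrGo vals num 0 (vals.length - 1)        -- r = len(vals)-1; loop skipped when empty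
  let pool := (PySem.Set.remove? st.2 ((PySem.List.pyGet? nums (head - p)).getD 0)).getD st.2
  (st.1 ++ [(num, valid)], PySem.Set.add pool num)

def validate_xmas_alt (nums : List Int) (preamble_length : Int) : List (Int × Bool) :=
  if (nums.length : Int) ≤ preamble_length then []
  else
    ((PySem.List.pyRange preamble_length (nums.length : Int)).foldl (stepB nums preamble_length)
      ([], PySem.Set.ofList (PySem.List.slice nums none (some preamble_length)))).1

-- ===== PRECONDITION & SPEC =====
-- Pre_ excludes EXACTLY the inputs on which the Python A raises (and B raises identically):
-- preamble_length ≤ 0 with nonempty nums (IndexError/KeyError from negative or zero window),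
-- and inputs where the duplicate-collapsing set pool makes a later pool.remove raise KeyError —
-- a pair of equal values i < j closer than preamble_length whose removal is reached with no
-- re-adding occurrence of the value in between; on every input where A returns, Pre_ holds.
def Pre_validate_xmas (nums : List Int) (preamble_length : Int) : Prop :=
  (nums.length : Int) ≤ preamble_length ∨
  (1 ≤ preamble_length ∧
    ∀ i ∈ List.range nums.length, ∀ j ∈ List.range nums.length,
      (i < j ∧ nums.getD i 0 = nums.getD j 0 ∧
       (j : Int) - (i : Int) < preamble_length ∧
       (j : Int) + preamble_length < (nums.length : Int)) →
      ∃ k ∈ List.range nums.length, (i : Int) + preamble_length ≤ (k : Int) ∧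
        (k : Int) < (j : Int) + preamble_length ∧ nums.getD k 0 = nums.getD i 0)
instance (nums : List Int) (preamble_length : Int) : Decidable (Pre_validate_xmas nums preamble_length) := by unfold Pre_validate_xmas; infer_instance

def pvWitness_validate_xmas : List Int × Int := ([35, 20, 15, 25, 47, 40, 62], 5)

def Spec_validate_xmas (nums : List Int) (preamble_length : Int) (out : List (Int × Bool)) : Prop := out = validate_xmas_alt nums preamble_length
instance (nums : List Int) (preamble_length : Int) (out : List (Int × Bool)) : Decidable (Spec_validate_xmas nums preamble_length out) := by unfold Spec_validate_xmas; infer_instance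

-- ===== CLAIM (what is proved, stated in full; the proofs are below) =====
def Claim_equal_validate_xmas : Prop := ∀ (nums : List Int) (preamble_length : Int), Dom_validate_xmas nums preamble_length → Pre_validate_xmas nums preamble_length → Spec_validate_xmas nums preamble_length (validate_xmas nums preamble_length)

-- ===== LEMMAS AND PROOFS =====

theorem pvWitness_ok :
    Dom_validate_xmas pvWitness_validate_xmas.1 pvWitness_validate_xmas.2 ∧
    Pre_validate_xmas pvWitness_validate_xmas.1 pvWitness_validate_xmas.2 := by decide

-- A's inner loop succeeds iff some a in the scanned list has t - a in the pool, distinct from a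
theorem find_sum2Aux_isSome (t : Int) (ns : PySem.Set Int) (l : List Int) :
    (find_sum2Aux t ns l).isSome = true ↔ ∃ a ∈ l, a ≠ t - a ∧ (t - a) ∈ ns := by
  induction l with
  | nil => simp [find_sum2Aux]
  | cons a rest ih =>
      have hdef : find_sum2Aux t ns (a :: rest) =
          if (!(a == t - a)) && PySem.Set.contains ns (t - a) then some (a, t - a)
          else find_sum2Aux t ns rest := rfl
      rw [hdef]
      by_cases hc : ((!(a == t - a)) && PySem.Set.contains ns (t - a)) = true
      · rw [if_pos hc]
        simp only [Bool.and_eq_true, Bool.not_eq_true', beq_eq_false_iff_ne,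
          PySem.Set.contains, List.contains_iff_mem] at hc
        simp only [Option.isSome_some, List.mem_cons, true_iff]
        exact ⟨a, Or.inl rfl, hc.1, hc.2⟩
      · rw [if_neg hc, ih]
        simp only [Bool.and_eq_true, Bool.not_eq_true', beq_eq_false_iff_ne,
          PySem.Set.contains, List.contains_iff_mem, not_and_or] at hc
        constructor
        · rintro ⟨x, hx, h1, h2⟩; exact ⟨x, List.mem_cons_of_mem _ hx, h1, h2⟩
        · rintro ⟨x, hx, h1, h2⟩
          rcases List.mem_cons.mp hx with rfl | hx'
          · rcases hc with hc | hc
            · simp at hc; exact absurd hc h1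
            · exact absurd h2 hc
          · exact ⟨x, hx', h1, h2⟩

-- correctness of the two-pointer scan on an increasingly sorted list
theorem twoPtrGo_iff (vals : List Int) (t : Int)
    (hmono : ∀ p q : Nat, p ≤ q → q < vals.length → vals.getD p 0 ≤ vals.getD q 0)
    (l r : Nat) (hr : r < vals.length) :
    twoPtrGo vals t l r = true ↔
      ∃ i j : Nat, l ≤ i ∧ i < j ∧ j ≤ r ∧ vals.getD i 0 + vals.getD j 0 = t := by
  suffices H : ∀ n l r, r - l ≤ n → r < vals.length →
      (twoPtrGo vals t l r = true ↔
        ∃ i j : Nat, l ≤ i ∧ i < j ∧ j ≤ r ∧ vals.getD i 0 + vals.getD j 0 = t) from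
    H (r - l) l r le_rfl hr
  intro n
  induction n with
  | zero =>
      intro l r hn _
      rw [twoPtrGo, dif_neg (by omega : ¬ l < r)]
      simp only [Bool.false_eq_true, false_iff, not_exists]
      intro i j h
      omega
  | succ n ih =>
      intro l r hn hrlen
      by_cases h : l < r
      · rw [twoPtrGo, dif_pos h]
        simp only []
        by_cases hs : vals.getD l 0 + vals.getD r 0 = t
        · rw [if_pos hs]
          simp only [true_iff]
          exact ⟨l, r, le_rfl, h, le_rfl, hs⟩
        · rw [if_neg hs]
          by_cases hlt : vals.getD l 0 + vals.getD r 0 < t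
          · rw [if_pos hlt, ih (l + 1) r (by omega) hrlen]
            constructor
            · rintro ⟨i, j, h1, h2, h3, h4⟩
              exact ⟨i, j, by omega, h2, h3, h4⟩
            · rintro ⟨i, j, h1, h2, h3, h4⟩
              refine ⟨i, j, ?_, h2, h3, h4⟩
              rcases Nat.lt_or_ge l i with hi | hi
              · omega
              · exfalso
                have hil : i = l := by omega
                have hj : vals.getD j 0 ≤ vals.getD r 0 := hmono j r h3 hrlen
                subst hil
                omega
          · rw [if_neg hlt, ih l (r - 1) (by omega) (by omega)]
            constructor
            · rintro ⟨i, j, h1, h2, h3, h4⟩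
              exact ⟨i, j, h1, h2, by omega, h4⟩
            · rintro ⟨i, j, h1, h2, h3, h4⟩
              refine ⟨i, j, h1, h2, ?_, h4⟩
              rcases Nat.lt_or_ge j r with hj | hj
              · omega
              · exfalso
                have hjr : j = r := by omega
                have hi : vals.getD l 0 ≤ vals.getD i 0 := hmono l i h1 (by omega)
                subst hjr
                omega
      · rw [twoPtrGo, dif_neg h]
        simp only [Bool.false_eq_true, false_iff, not_exists]
        intro i j hij
        omega

-- the two validity tests agree on every duplicate-free pool
theorem valid_eq (s : PySem.Set Int) (hs : List.Nodup s) (t : Int) :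
    (find_sum2 t s).isSome =
      twoPtrGo (PySem.List.sorted s (fun x => x)) t 0
        ((PySem.List.sorted s (fun x => x)).length - 1) := by
  have hperm : (PySem.List.sorted s (fun x => x)).Perm s := PySem.List.sorted_perm s _ _
  have hnd : (PySem.List.sorted s (fun x => x)).Nodup := hperm.nodup_iff.mpr hs
  have hlt : (PySem.List.sorted s (fun x => x)).Pairwise (· < ·) := by
    have h1 := PySem.List.sorted_pairwise s (fun x => x)
    exact List.Pairwise.imp₂ (fun a b hle hne => lt_of_le_of_ne hle hne) h1 hnd
  set vals := PySem.List.sorted s (fun x => x) with hvals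
  have hmono : ∀ p q : Nat, p ≤ q → q < vals.length → vals.getD p 0 ≤ vals.getD q 0 := by
    intro p q hpq hq
    rw [List.getD_eq_getElem _ _ (by omega), List.getD_eq_getElem _ _ hq]
    exact PySem.List.sorted_id_getElem_mono s hpq hq
  rcases Nat.eq_zero_or_pos vals.length with hlen | hlen
  · have hse : s = [] := by
      have : vals = [] := List.eq_nil_of_length_eq_zero hlen
      exact ((this ▸ hperm).symm).eq_nil
    subst hse
    rw [show vals = [] from List.eq_nil_of_length_eq_zero hlen]
    rw [twoPtrGo, dif_neg (by simp : ¬ (0:Nat) < ([] : List Int).length - 1)]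
    rfl
  · rw [Bool.eq_iff_iff]
    rw [show find_sum2 t s = find_sum2Aux t s s from rfl, find_sum2Aux_isSome]
    rw [twoPtrGo_iff vals t hmono 0 (vals.length - 1) (by omega)]
    have hstrict : ∀ i j : Nat, i < j → (hj : j < vals.length) →
        vals.getD i 0 < vals.getD j 0 := by
      intro i j hij hj
      rw [List.getD_eq_getElem _ _ (by omega), List.getD_eq_getElem _ _ hj]
      exact List.pairwise_iff_getElem.mp hlt i j (by omega) hj hij
    constructor
    · rintro ⟨a, ha, hne, hb⟩
      have ha' : a ∈ vals := hperm.mem_iff.mpr ha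
      have hb' : (t - a) ∈ vals := hperm.mem_iff.mpr hb
      obtain ⟨i, hi, hia⟩ := List.mem_iff_getElem.mp ha'
      obtain ⟨j, hj, hjb⟩ := List.mem_iff_getElem.mp hb'
      have hij : i ≠ j := by
        intro hEq
        subst hEq
        exact hne (hia ▸ hjb)
      rcases Nat.lt_or_ge i j with hlt' | hge
      · refine ⟨i, j, Nat.zero_le _, hlt', by omega, ?_⟩
        rw [List.getD_eq_getElem _ _ hi, List.getD_eq_getElem _ _ hj, hia, hjb]
        ring
      · refine ⟨j, i, Nat.zero_le _, by omega, by omega, ?_⟩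
        rw [List.getD_eq_getElem _ _ hj, List.getD_eq_getElem _ _ hi, hia, hjb]
        ring
    · rintro ⟨i, j, _, hij, hjr, hsum⟩
      have hj : j < vals.length := by omega
      have hi : i < vals.length := by omega
      refine ⟨vals.getD i 0, hperm.mem_iff.mp ?_, ?_, ?_⟩
      · rw [List.getD_eq_getElem _ _ hi]; exact List.getElem_mem hi
      · have := hstrict i j hij hj
        omega
      · have hbv : t - vals.getD i 0 = vals.getD j 0 := by omega
        rw [hbv]
        refine hperm.mem_iff.mp ?_
        rw [List.getD_eq_getElem _ _ hj]
        exact List.getElem_mem hj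

theorem nodup_step_pool (s : PySem.Set Int) (hs : List.Nodup s) (x num : Int) :
    List.Nodup (PySem.Set.add ((PySem.Set.remove? s x).getD s) num) := by
  have h1 : List.Nodup ((PySem.Set.remove? s x).getD s) := by
    unfold PySem.Set.remove?
    split
    · exact hs.filter _
    · exact hs
  unfold PySem.Set.add
  split
  · exact h1
  · rename_i hc
    simp only [PySem.Set.contains, List.contains_iff_mem] at hc
    simpa [List.nodup_append] using ⟨h1, fun a ha (h : a = num) => hc (h ▸ ha)⟩

theorem loop_eq (nums : List Int) (p : Int) (heads : List Int) :
    ∀ (out : List (Int × Bool)) (pool : PySem.Set Int), List.Nodup pool →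
      heads.foldl (stepA nums p) (out, pool) = heads.foldl (stepB nums p) (out, pool) := by
  induction heads with
  | nil => intro out pool _; rfl
  | cons h rest ih =>
      intro out pool hnd
      simp only [List.foldl_cons]
      have hstep : stepA nums p (out, pool) h = stepB nums p (out, pool) h := by
        unfold stepA stepB
        simp only [valid_eq pool hnd]
      rw [hstep]
      have : stepB nums p (out, pool) h =
          (out ++ [((PySem.List.pyGet? nums h).getD 0, _)],
            PySem.Set.add ((PySem.Set.remove? pool ((PySem.List.pyGet? nums (h - p)).getD 0)).getD pool)
              ((PySem.List.pyGet? nums h).getD 0)) := rfl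
      rw [this]
      exact ih _ _ (nodup_step_pool pool hnd _ _)

-- ===== VERDICT (by name: the statement is the Claim_ definition above) =====
theorem validate_xmas_spec : Claim_equal_validate_xmas := by
  intro nums p _ _
  unfold Spec_validate_xmas validate_xmas validate_xmas_alt
  split
  · rfl
  · rw [loop_eq nums p _ _ _ (PySem.Set.nodup_ofList _)]
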